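-- pv_equiv track=rewrite | github.com/zhanghecn/deer-flow | .openagents/agents/dev/lead_agent/skills/image-generation/scripts/generate.py | find_latest_model_with_prefix
-- ===== SOURCE A (Python) =====
-- def find_latest_model_with_prefix(models: list[dict], prefix: str) -> str | None:
--     prefix = prefix.lower()
--     candidates = []
--     for model in models:
--         model_id = str(model.get("id", "")).strip()
--         model_name = str(model.get("name", "")).strip()
--         if model_id.lower().startswith(prefix) or model_name.lower().startswith(prefix):
--             candidates.append(model)
--
--     if not candidates:
--         return None
--
--     latest = max(
--         candidates,
--         key=lambda item: (int(item.get("created", 0) or 0), str(item.get("id", ""))),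
--     )
--     return str(latest.get("id", "")).strip() or None
-- ===== SOURCE B (Python) =====
-- def _sort_key(m):
--     v = m.get("created", 0) or 0
--     try:
--         created = int(v)
--     except (TypeError, ValueError):
--         created = 0
--     return (created, str(m.get("id", "")))
--
--
-- def find_latest_model_with_prefix(models: list[dict], prefix: str) -> str | None:
--     p = prefix.lower()
--     # Stable descending sort by (created, id): the first prefix match is the
--     # latest candidate, and among equal keys the earliest in the input wins,
--     # exactly like max() over the filtered list.
--     for m in sorted(models, key=_sort_key, reverse=True):
--         model_id = str(m.get("id", "")).strip()
--         model_name = str(m.get("name", "")).strip()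
--         if model_id.lower().startswith(p) or model_name.lower().startswith(p):
--             return model_id or None
--     return None
-- ===== Notes on version B (the rewrite author's own statement) =====
-- stated objective: alternative
-- what changed: B replaces A's filter-then-max structure by sort-then-scan: it stably sorts ALL models by (created, id) descending and returns the first model whose id or name matches the prefix (with a defensive key so sorting non-candidates never raises); stability makes the first match exactly max()'s first-of-ties winner.
import Mathlib
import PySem

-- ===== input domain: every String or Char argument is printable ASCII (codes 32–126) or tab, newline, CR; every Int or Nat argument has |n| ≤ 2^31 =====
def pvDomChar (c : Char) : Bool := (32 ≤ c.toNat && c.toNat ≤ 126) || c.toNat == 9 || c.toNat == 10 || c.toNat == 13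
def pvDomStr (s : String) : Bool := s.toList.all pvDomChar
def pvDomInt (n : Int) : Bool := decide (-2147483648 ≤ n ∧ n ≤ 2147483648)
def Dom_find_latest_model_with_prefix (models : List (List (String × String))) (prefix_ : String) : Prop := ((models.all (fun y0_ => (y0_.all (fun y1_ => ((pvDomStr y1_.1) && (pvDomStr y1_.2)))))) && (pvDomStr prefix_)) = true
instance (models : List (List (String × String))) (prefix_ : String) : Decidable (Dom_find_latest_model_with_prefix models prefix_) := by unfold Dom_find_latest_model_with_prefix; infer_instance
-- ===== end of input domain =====

-- B replaces A's filter-then-max by sort-then-scan: a stable descending sort of ALL models by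
-- (created, id), then return the first prefix match (objective: alternative algorithm; not faster).

-- ===== PORT A =====
-- int(item.get("created", 0) or 0): a missing key or empty string gives 0; a non-parsable
-- string is a ValueError (PySem.Int.ofStr? = none), excluded by Pre_ — '.getD 0' is only a
-- placeholder on those excluded inputs.
def pvCreatedOf (item : List (String × String)) : Int :=
  match PySem.Dict.get? ⟨item⟩ "created" with
  | none => 0
  | some v => if v = "" then 0 else (PySem.Int.ofStr? v).getD 0

def find_latest_model_with_prefix (models : List (List (String × String))) (prefix_ : String) : Option String :=
  let p := PySem.Str.lower prefix_
  let candidates := models.foldl (fun acc model =>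
    let model_id := PySem.Str.strip (PySem.Dict.getD ⟨model⟩ "id" "")
    let model_name := PySem.Str.strip (PySem.Dict.getD ⟨model⟩ "name" "")
    if PySem.Str.startswith (PySem.Str.lower model_id) p
        || PySem.Str.startswith (PySem.Str.lower model_name) p
    then acc ++ [model] else acc) []
  -- 'if not candidates: return None' coincides with max2? [] = none
  match PySem.List.max2? candidates pvCreatedOf (fun item => PySem.Dict.getD ⟨item⟩ "id" "") with
  | none => none
  | some latest =>
      let r := PySem.Str.strip (PySem.Dict.getD ⟨latest⟩ "id" "")
      if r = "" then none else some r

-- ===== PORT B =====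
-- Source B's _sort_key: the defensive int() (try/except → 0) is exactly '(ofStr? v).getD 0'
def pvSortKeyC (m : List (String × String)) : Int :=
  match PySem.Dict.get? ⟨m⟩ "created" with
  | none => 0
  | some v => if v = "" then 0 else (PySem.Int.ofStr? v).getD 0

def pvSortKeyI (m : List (String × String)) : String :=
  PySem.Dict.getD ⟨m⟩ "id" ""

-- the loop body's prefix test
def pvIsCand (p : String) (m : List (String × String)) : Bool :=
  PySem.Str.startswith (PySem.Str.lower (PySem.Str.strip (PySem.Dict.getD ⟨m⟩ "id" ""))) p
    || PySem.Str.startswith (PySem.Str.lower (PySem.Str.strip (PySem.Dict.getD ⟨m⟩ "name" ""))) p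

-- 'for m in sorted(models, key=_sort_key, reverse=True): if <match>: return model_id or None'
def find_latest_model_with_prefix_alt (models : List (List (String × String))) (prefix_ : String) : Option String :=
  let p := PySem.Str.lower prefix_
  match (PySem.List.sorted2 models pvSortKeyC pvSortKeyI true).find? (pvIsCand p) with
  | none => none
  | some m =>
      let model_id := PySem.Str.strip (PySem.Dict.getD ⟨m⟩ "id" "")
      if model_id = "" then none else some model_id

-- ===== PRECONDITION & SPEC =====
def pvCreatedOk (m : List (String × String)) : Bool :=
  match PySem.Dict.get? ⟨m⟩ "created" with
  | none => true
  | some v => v == "" || (PySem.Int.ofStr? v).isSome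

-- Pre_ excludes exactly the inputs where Python A raises ValueError: a model matching the
-- prefix whose "created" value is a nonempty string that int() cannot parse.
def Pre_find_latest_model_with_prefix (models : List (List (String × String))) (prefix_ : String) : Prop :=
  ∀ m ∈ models, pvIsCand (PySem.Str.lower prefix_) m = true → pvCreatedOk m = true
instance (models : List (List (String × String))) (prefix_ : String) : Decidable (Pre_find_latest_model_with_prefix models prefix_) := by unfold Pre_find_latest_model_with_prefix; infer_instance

def pvWitness_find_latest_model_with_prefix : (List (List (String × String))) × String :=
  ([[("id", "gpt-4o"), ("created", "3")], [("id", "gpt-4"), ("name", "old")]], "gpt")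

def Spec_find_latest_model_with_prefix (models : List (List (String × String))) (prefix_ : String) (out : Option String) : Prop := out = find_latest_model_with_prefix_alt models prefix_
instance (models : List (List (String × String))) (prefix_ : String) (out : Option String) : Decidable (Spec_find_latest_model_with_prefix models prefix_ out) := by unfold Spec_find_latest_model_with_prefix; infer_instance

-- ===== CLAIM (what is proved, stated in full; the proofs are below) =====
def Claim_equal_find_latest_model_with_prefix : Prop := ∀ (models : List (List (String × String))) (prefix_ : String), Dom_find_latest_model_with_prefix models prefix_ → Pre_find_latest_model_with_prefix models prefix_ → Spec_find_latest_model_with_prefix models prefix_ (find_latest_model_with_prefix models prefix_)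

-- ===== LEMMAS AND PROOFS =====

-- one step of "keep the first best so far" (strict klt, so the earlier element wins ties)
def bestStep {α : Type} (klt : α → α → Bool) : Option α → α → Option α
  | none, x => some x
  | some m, x => if klt m x then some x else some m

-- klt is a strict "key less than" test (asymmetric, with the weak-strict transitivity below);
-- descending insertion (as in sorted(..., reverse=True)) keeps the list descending
lemma insertBy_pairwise_desc {α : Type} (klt : α → α → Bool)
    (hasym : ∀ a b, klt a b = true → klt b a = false)
    (htrans : ∀ y m x, klt y m = false → klt y x = true → klt m x = true)
    (x : α) (acc : List α) (h : acc.Pairwise (fun a b => klt a b = false)) :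
    (PySem.List.insertBy (fun a b => klt b a) x acc).Pairwise (fun a b => klt a b = false) := by
  induction acc with
  | nil => simp [PySem.List.insertBy]
  | cons y ys ih =>
    rcases List.pairwise_cons.mp h with ⟨hy, hys⟩
    by_cases hlt : klt y x = true
    · rw [show PySem.List.insertBy (fun a b => klt b a) x (y :: ys)
          = x :: y :: ys by simp [PySem.List.insertBy, hlt]]
      refine List.pairwise_cons.mpr ⟨?_, h⟩
      intro m hm
      rcases List.mem_cons.mp hm with rfl | hm
      · exact hasym _ _ hlt
      · exact hasym m x (htrans y m x (hy m hm) hlt)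
    · rw [show PySem.List.insertBy (fun a b => klt b a) x (y :: ys)
          = y :: PySem.List.insertBy (fun a b => klt b a) x ys
          by simp [PySem.List.insertBy, hlt]]
      refine List.pairwise_cons.mpr ⟨?_, ih hys⟩
      intro m hm
      rcases (PySem.List.mem_insertBy _ x m ys).mp hm with rfl | hm
      · exact Bool.eq_false_iff.mpr hlt
      · exact hy m hm

-- first match after a stable descending insertion = one running-best step
lemma find?_insertBy_desc {α : Type} (klt : α → α → Bool)
    (htrans : ∀ y m x, klt y m = false → klt y x = true → klt m x = true)
    (p : α → Bool) (x : α) (acc : List α)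
    (h : acc.Pairwise (fun a b => klt a b = false)) :
    (PySem.List.insertBy (fun a b => klt b a) x acc).find? p =
      (if p x then bestStep klt (acc.find? p) x else acc.find? p) := by
  induction acc with
  | nil =>
    simp only [PySem.List.insertBy, List.find?_nil]
    cases hp : p x <;> simp [List.find?, hp, bestStep]
  | cons y ys ih =>
    rcases List.pairwise_cons.mp h with ⟨hy, hys⟩
    by_cases hlt : klt y x = true
    · rw [show PySem.List.insertBy (fun a b => klt b a) x (y :: ys)
          = x :: y :: ys by simp [PySem.List.insertBy, hlt]]
      cases hp : p x with
      | false => simp [hp]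
      | true =>
        have hL : List.find? p (x :: y :: ys) = some x := by simp [hp]
        rw [hL, if_pos rfl]
        cases hf : List.find? p (y :: ys) with
        | none => rfl
        | some m =>
          have hm : m ∈ y :: ys := List.mem_of_find?_eq_some hf
          have hmx : klt m x = true := by
            rcases List.mem_cons.mp hm with rfl | hm
            · exact hlt
            · exact htrans y m x (hy m hm) hlt
          simp [bestStep, hmx]
    · rw [show PySem.List.insertBy (fun a b => klt b a) x (y :: ys)
          = y :: PySem.List.insertBy (fun a b => klt b a) x ys
          by simp [PySem.List.insertBy, hlt]]
      cases hpy : p y with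
      | true =>
        cases hp : p x <;> simp [hpy, bestStep, hlt]
      | false =>
        simp only [List.find?_cons, hpy]
        exact ih hys

-- the whole insertion sort followed by find? = running best over the unsorted list
lemma find?_foldl_insertBy {α : Type} (klt : α → α → Bool)
    (hasym : ∀ a b, klt a b = true → klt b a = false)
    (htrans : ∀ y m x, klt y m = false → klt y x = true → klt m x = true)
    (p : α → Bool) :
    ∀ (l acc : List α), acc.Pairwise (fun a b => klt a b = false) →
    (l.foldl (fun acc x => PySem.List.insertBy (fun a b => klt b a) x acc) acc).find? p
      = l.foldl (fun best x => if p x then bestStep klt best x else best) (acc.find? p) := by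
  intro l
  induction l with
  | nil => intro acc _; rfl
  | cons x t ih =>
    intro acc h
    rw [List.foldl_cons, List.foldl_cons,
      ih _ (insertBy_pairwise_desc klt hasym htrans x acc h),
      find?_insertBy_desc klt htrans p x acc h]

-- the componentwise (created, id) comparison both programs use
def pvKlt (a b : List (String × String)) : Bool :=
  decide (pvSortKeyC a < pvSortKeyC b)
    || (!decide (pvSortKeyC b < pvSortKeyC a) && decide (pvSortKeyI a < pvSortKeyI b))

lemma pvKlt_iff (a b : List (String × String)) :
    pvKlt a b = true ↔ pvSortKeyC a < pvSortKeyC b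
      ∨ (pvSortKeyC a = pvSortKeyC b ∧ pvSortKeyI a < pvSortKeyI b) := by
  simp only [pvKlt, Bool.or_eq_true, Bool.and_eq_true, Bool.not_eq_true',
    decide_eq_true_eq, decide_eq_false_iff_not]
  constructor
  · rintro (h | ⟨h1, h2⟩)
    · exact Or.inl h
    · rcases lt_or_eq_of_le (not_lt.mp h1) with h' | h'
      · exact Or.inl h'
      · exact Or.inr ⟨h', h2⟩
  · rintro (h | ⟨h1, h2⟩)
    · exact Or.inl h
    · exact Or.inr ⟨by rw [h1]; exact lt_irrefl _, h2⟩

lemma pvKlt_asym (a b : List (String × String)) (h : pvKlt a b = true) : pvKlt b a = false := by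
  rw [Bool.eq_false_iff]
  intro hb
  rcases (pvKlt_iff a b).mp h with h1 | ⟨h1, h2⟩ <;>
    rcases (pvKlt_iff b a).mp hb with g1 | ⟨g1, g2⟩
  · exact absurd g1 (asymm h1)
  · exact absurd h1 (by rw [g1]; exact lt_irrefl _)
  · exact absurd g1 (by rw [h1]; exact lt_irrefl _)
  · exact absurd g2 (asymm h2)

lemma pvKlt_trans (y m x : List (String × String))
    (h1 : pvKlt y m = false) (h2 : pvKlt y x = true) : pvKlt m x = true := by
  have hn : ¬ (pvSortKeyC y < pvSortKeyC m
      ∨ (pvSortKeyC y = pvSortKeyC m ∧ pvSortKeyI y < pvSortKeyI m)) := by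
    intro hc
    rw [(pvKlt_iff y m).mpr hc] at h1
    cases h1
  push Not at hn
  apply (pvKlt_iff m x).mpr
  rcases (pvKlt_iff y x).mp h2 with hx | ⟨hx1, hx2⟩
  · exact Or.inl (lt_of_le_of_lt hn.1 hx)
  · rcases lt_or_eq_of_le hn.1 with hm | hm
    · exact Or.inl (hx1 ▸ hm)
    · exact Or.inr ⟨hm.trans hx1, lt_of_le_of_lt (hn.2 hm.symm) hx2⟩

-- ===== VERDICT (by name: the statement is the Claim_ definition above) =====
theorem find_latest_model_with_prefix_spec : Claim_equal_find_latest_model_with_prefix := by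
  intro models prefix_ _ _
  unfold Spec_find_latest_model_with_prefix
  unfold find_latest_model_with_prefix find_latest_model_with_prefix_alt
  simp only []
  set p := PySem.Str.lower prefix_ with hp
  -- A's candidate loop is a filter
  have hcand : (models.foldl (fun acc model =>
      let model_id := PySem.Str.strip (PySem.Dict.getD ⟨model⟩ "id" "")
      let model_name := PySem.Str.strip (PySem.Dict.getD ⟨model⟩ "name" "")
      if PySem.Str.startswith (PySem.Str.lower model_id) p
          || PySem.Str.startswith (PySem.Str.lower model_name) p
      then acc ++ [model] else acc) ([] : List (List (String × String))))
      = models.filter (fun m => pvIsCand p m) := by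
    simpa [pvIsCand] using
      PySem.List.foldl_append_if (fun m => pvIsCand p m) (fun x => x) models []
  rw [hcand]
  -- B's stable descending sort, then first match = running best over models
  have hsorted : PySem.List.sorted2 models pvSortKeyC pvSortKeyI true
      = models.foldl (fun acc x => PySem.List.insertBy (fun a b => pvKlt b a) x acc) [] := rfl
  rw [hsorted,
    find?_foldl_insertBy pvKlt pvKlt_asym pvKlt_trans (pvIsCand p) models [] (by simp),
    show (List.find? (pvIsCand p) [] : Option (List (String × String))) = none from rfl,
    PySem.List.foldl_if_eq_foldl_filter (pvIsCand p) (bestStep pvKlt) models none]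
  -- and that running best over the filtered list is literally A's max2?
  have hmax : PySem.List.max2? (models.filter (fun m => pvIsCand p m)) pvCreatedOf
        (fun item => (PySem.Dict.getD ⟨item⟩ "id" "" : String))
      = (models.filter (fun m => pvIsCand p m)).foldl (bestStep pvKlt) none := by
    unfold PySem.List.max2?
    apply PySem.List.foldl_congr_mem
    intro best x _
    cases best <;> rfl
  rw [hmax]
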